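-- pv_equiv track=rewrite | github.com/hotel-risk-bot/hotel-risk-bot | marketing_update_generator.py | _get_umbrella_metrics
-- ===== SOURCE A (Python) =====
-- def _get_umbrella_metrics(carriers_data, is_internal=True):
--     metrics = ["Premium", "# of Units", "# of Locations", "Umbrella Limit", "Total Sales"]
--     all_values = {}
--     for c in carriers_data:
--         for k, v in c["values"].items():
--             if k not in all_values:
--                 all_values[k] = []
--             all_values[k].append(v)
--     # Rate metrics
--     for m in ["Rate/Unit", "Rate/$1K Sales"]:
--         if m in all_values and any(v != "\u2014" for v in all_values.get(m, [])):
--             metrics.append(m)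
--     # Broker on all versions
--     if "Broker" in all_values and any(v != "\u2014" for v in all_values["Broker"]):
--         metrics.append("Broker")
--     if is_internal:
--         for m in ["Commission", "Revenue"]:
--             if m in all_values and any(v != "\u2014" for v in all_values[m]):
--                 metrics.append(m)
--     return metrics
-- ===== SOURCE B (Python) =====
-- def _get_umbrella_metrics(carriers_data, is_internal=True):
--     def has_value(m):
--         return any(m in c["values"] and c["values"][m] != "\u2014" for c in carriers_data)
--     extras = ["Rate/Unit", "Rate/$1K Sales", "Broker"]
--     if is_internal:
--         extras += ["Commission", "Revenue"]
--     return ["Premium", "# of Units", "# of Locations", "Umbrella Limit", "Total Sales"] + [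
--         m for m in extras if has_value(m)
--     ]
-- ===== Notes on version B (the rewrite author's own statement) =====
-- stated objective: simpler
-- what changed: Drops A's aggregation dict (built by a nested loop over all carriers' items) and instead checks each candidate metric directly with a per-metric any() scan over the carriers, appending candidates via one filtered comprehension in the same order.
import Mathlib
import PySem

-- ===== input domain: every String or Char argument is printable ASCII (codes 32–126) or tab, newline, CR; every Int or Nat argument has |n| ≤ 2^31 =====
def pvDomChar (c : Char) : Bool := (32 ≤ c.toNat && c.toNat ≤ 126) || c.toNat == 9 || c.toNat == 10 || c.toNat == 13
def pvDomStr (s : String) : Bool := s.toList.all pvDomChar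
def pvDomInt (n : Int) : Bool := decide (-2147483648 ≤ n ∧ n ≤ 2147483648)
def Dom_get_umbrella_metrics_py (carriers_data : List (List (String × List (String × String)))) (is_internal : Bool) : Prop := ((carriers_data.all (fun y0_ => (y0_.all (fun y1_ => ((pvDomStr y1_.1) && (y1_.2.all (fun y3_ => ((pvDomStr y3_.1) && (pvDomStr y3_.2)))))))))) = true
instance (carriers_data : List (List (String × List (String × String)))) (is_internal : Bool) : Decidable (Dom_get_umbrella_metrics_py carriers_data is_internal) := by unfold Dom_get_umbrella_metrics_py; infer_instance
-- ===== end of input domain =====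

-- B drops A's aggregation dict and checks each candidate metric by a direct per-metric scan over the carriers (objective: simpler).


-- ===== PORT A =====
-- c["values"]: a dict lookup (Dict.ofList of the association list); the [] default never fires under Pre_.
def pvValsOf (c : List (String × List (String × String))) : PySem.Dict String String :=
  PySem.Dict.ofList ((PySem.Dict.ofList c).getD "values" [])

-- 'if k not in all_values: all_values[k] = []' followed by 'all_values[k].append(v)'
def pvStepA (d : PySem.Dict String (List String)) (kv : String × String) : PySem.Dict String (List String) :=
  let d' := if d.contains kv.1 then d else d.insert kv.1 []
  d'.insert kv.1 (d'.getD kv.1 [] ++ [kv.2])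

def get_umbrella_metrics_py (carriers_data : List (List (String × List (String × String)))) (is_internal : Bool) : List String :=
  let metrics : List String := ["Premium", "# of Units", "# of Locations", "Umbrella Limit", "Total Sales"]
  let all_values : PySem.Dict String (List String) :=
    carriers_data.foldl (fun d c => (pvValsOf c).items.foldl pvStepA d) PySem.Dict.empty
  -- all_values[m] is guarded by 'm in all_values' (and all_values.get(m, []) is getD), so getD is exact here
  let metrics := ["Rate/Unit", "Rate/$1K Sales"].foldl (fun ms m =>
    if all_values.contains m && (all_values.getD m []).any (fun v => v != "\u2014") then ms ++ [m] else ms) metrics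
  let metrics := if all_values.contains "Broker" && (all_values.getD "Broker" []).any (fun v => v != "\u2014") then metrics ++ ["Broker"] else metrics
  if is_internal then
    ["Commission", "Revenue"].foldl (fun ms m =>
      if all_values.contains m && (all_values.getD m []).any (fun v => v != "\u2014") then ms ++ [m] else ms) metrics
  else metrics

-- ===== PORT B =====
-- has_value(m): any(m in c["values"] and c["values"][m] != "\u2014" for c in carriers_data)
def pvHasValue (carriers_data : List (List (String × List (String × String)))) (m : String) : Bool :=
  carriers_data.any (fun c =>
    let vals := pvValsOf c
    vals.contains m && vals.getD m "" != "\u2014")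

def get_umbrella_metrics_py_alt (carriers_data : List (List (String × List (String × String)))) (is_internal : Bool) : List String :=
  let extras := ["Rate/Unit", "Rate/$1K Sales", "Broker"] ++ (if is_internal then ["Commission", "Revenue"] else [])
  ["Premium", "# of Units", "# of Locations", "Umbrella Limit", "Total Sales"]
    ++ extras.filter (pvHasValue carriers_data)

-- ===== PRECONDITION & SPEC =====
-- Pre_ excludes exactly the inputs where some carrier dict lacks the key "values": there Python A (and B) raises KeyError.
def Pre_get_umbrella_metrics_py (carriers_data : List (List (String × List (String × String)))) (is_internal : Bool) : Prop :=
  (carriers_data.all (fun c => (PySem.Dict.ofList c).contains "values")) = true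
instance (carriers_data : List (List (String × List (String × String)))) (is_internal : Bool) : Decidable (Pre_get_umbrella_metrics_py carriers_data is_internal) := by unfold Pre_get_umbrella_metrics_py; infer_instance

def pvWitness_get_umbrella_metrics_py : (List (List (String × List (String × String)))) × Bool :=
  ([[("values", [("Broker", "Acme"), ("Commission", "x")])]], true)

def Spec_get_umbrella_metrics_py (carriers_data : List (List (String × List (String × String)))) (is_internal : Bool) (out : List String) : Prop := out = get_umbrella_metrics_py_alt carriers_data is_internal
instance (carriers_data : List (List (String × List (String × String)))) (is_internal : Bool) (out : List String) : Decidable (Spec_get_umbrella_metrics_py carriers_data is_internal out) := by unfold Spec_get_umbrella_metrics_py; infer_instance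

-- ===== CLAIM (what is proved, stated in full; the proofs are below) =====
def Claim_equal_get_umbrella_metrics_py : Prop := ∀ (carriers_data : List (List (String × List (String × String)))) (is_internal : Bool), Dom_get_umbrella_metrics_py carriers_data is_internal → Pre_get_umbrella_metrics_py carriers_data is_internal → Spec_get_umbrella_metrics_py carriers_data is_internal (get_umbrella_metrics_py carriers_data is_internal)

-- ===== LEMMAS AND PROOFS =====

theorem pvStepA_eq_modify (d : PySem.Dict String (List String)) (kv : String × String) :
    pvStepA d kv = d.modify kv.1 [] (fun l => l ++ [kv.2]) := by
  by_cases h : d.contains kv.1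
  · simp [pvStepA, h, PySem.Dict.modify, PySem.Dict.getD_eq_get?_getD]
  · have h0 : d.get? kv.1 = none := (PySem.Dict.get?_eq_none_iff_contains d kv.1).mpr (by simpa using h)
    simp [pvStepA, h, PySem.Dict.modify, PySem.Dict.insert_insert_self, PySem.Dict.getD_eq_get?_getD, h0]

theorem pv_fold_flatten (cs : List (List (String × List (String × String))))
    (d : PySem.Dict String (List String)) :
    cs.foldl (fun d c => (pvValsOf c).items.foldl pvStepA d) d
      = (cs.flatMap (fun c => (pvValsOf c).items)).foldl pvStepA d := by
  induction cs generalizing d with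
  | nil => rfl
  | cons c cs ih => simp [List.foldl_append, ih]

theorem pv_lookup_any (l : List (String × String)) (m : String) (h : (l.map Prod.fst).Nodup) :
    ((l.filter (fun kv => kv.1 == m)).map Prod.snd).any (fun v => v != "\u2014")
      = ((PySem.Dict.mk l).contains m && (PySem.Dict.mk l).getD m "" != "\u2014") := by
  induction l with
  | nil => simp [PySem.Dict.contains_mk]
  | cons kv t ih =>
    obtain ⟨k, v⟩ := kv
    simp only [List.map_cons, List.nodup_cons] at h
    by_cases hk : k = m
    · subst hk
      have hflt : t.filter (fun kv => kv.1 == k) = [] := by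
        apply List.filter_eq_nil_iff.mpr
        intro kv hmem
        simp only [beq_iff_eq]
        intro he
        exact h.1 (by simpa [he] using List.mem_map_of_mem (f := Prod.fst) hmem)
      simp [hflt, PySem.Dict.contains_mk, PySem.Dict.getD_eq_get?_getD, PySem.Dict.get?_mk_cons]
    · have hke : (k == m) = false := by simpa using hk
      simpa [hke, PySem.Dict.contains_mk, PySem.Dict.getD_eq_get?_getD, PySem.Dict.get?_mk_cons] using ih h.2

theorem pv_percarrier (c : List (String × List (String × String))) (m : String) :
    (((pvValsOf c).items.filter (fun kv => kv.1 == m)).map Prod.snd).any (fun v => v != "\u2014")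
      = ((pvValsOf c).contains m && (pvValsOf c).getD m "" != "\u2014") := by
  have hnd : ((pvValsOf c).items.map Prod.fst).Nodup := by
    have := PySem.Dict.nodup_keys_ofList ((PySem.Dict.ofList c).getD "values" [])
    simpa [pvValsOf, PySem.Dict.keys] using this
  have hmk : PySem.Dict.mk (pvValsOf c).items = pvValsOf c := rfl
  simpa [hmk] using pv_lookup_any (pvValsOf c).items m hnd

theorem pv_flat_any (cs : List (List (String × List (String × String)))) (m : String) :
    (((cs.flatMap (fun c => (pvValsOf c).items)).filter (fun kv => kv.1 == m)).map Prod.snd).any (fun v => v != "\u2014")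
      = pvHasValue cs m := by
  induction cs with
  | nil => simp [pvHasValue]
  | cons c cs ih =>
    simp only [List.flatMap_cons, List.filter_append, List.map_append, List.any_append, ih,
      pvHasValue, List.any_cons]
    congr 1
    exact pv_percarrier c m

theorem pv_cond_eq (cs : List (List (String × List (String × String)))) (m : String) :
    ((cs.foldl (fun d c => (pvValsOf c).items.foldl pvStepA d) PySem.Dict.empty).contains m
      && ((cs.foldl (fun d c => (pvValsOf c).items.foldl pvStepA d) PySem.Dict.empty).getD m []).any (fun v => v != "\u2014"))
      = pvHasValue cs m := by
  rw [pv_fold_flatten]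
  set pairs := cs.flatMap (fun c => (pvValsOf c).items) with hpairs
  have hstep : pvStepA = (fun d (kv : String × String) => d.modify kv.1 [] (fun l => l ++ [kv.2])) := by
    funext d kv; exact pvStepA_eq_modify d kv
  rw [hstep]
  have hgetD : (pairs.foldl (fun d kv => d.modify kv.1 [] (fun l => l ++ [kv.2])) PySem.Dict.empty).getD m []
      = (pairs.filter (fun kv => kv.1 == m)).map Prod.snd := by
    simpa using PySem.Dict.getD_foldl_modify_append pairs PySem.Dict.empty m
  have hkeys : (pairs.foldl (fun d kv => d.modify kv.1 [] (fun l => l ++ [kv.2])) PySem.Dict.empty).keys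
      = PySem.Set.update (PySem.Dict.empty : PySem.Dict String (List String)).keys (pairs.map Prod.fst) := by
    exact PySem.Dict.keys_foldl_modify_key pairs Prod.fst [] (fun _ kv l => l ++ [kv.2]) PySem.Dict.empty
  have hcont : (pairs.foldl (fun d kv => d.modify kv.1 [] (fun l => l ++ [kv.2])) PySem.Dict.empty).contains m
      = decide (m ∈ pairs.map Prod.fst) := by
    rw [PySem.Dict.contains_eq_decide_mem_keys, hkeys]
    simp [PySem.Set.mem_update, PySem.Dict.keys_empty]
  rw [hgetD, hcont]
  -- drop the contains conjunct
  have hdrop : (decide (m ∈ pairs.map Prod.fst) && ((pairs.filter (fun kv => kv.1 == m)).map Prod.snd).any (fun v => v != "\u2014"))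
      = ((pairs.filter (fun kv => kv.1 == m)).map Prod.snd).any (fun v => v != "\u2014") := by
    by_cases hm : m ∈ pairs.map Prod.fst
    · simp [hm]
    · have : pairs.filter (fun kv => kv.1 == m) = [] := by
        apply List.filter_eq_nil_iff.mpr
        intro kv hmem
        simp only [beq_iff_eq]
        intro he
        exact hm (by simpa [he] using List.mem_map_of_mem (f := Prod.fst) hmem)
      simp [hm, this]
  rw [hdrop, hpairs]
  exact pv_flat_any cs m

theorem pv_ports_eq (carriers_data : List (List (String × List (String × String)))) (is_internal : Bool) :
    get_umbrella_metrics_py carriers_data is_internal = get_umbrella_metrics_py_alt carriers_data is_internal := by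
  simp only [get_umbrella_metrics_py, get_umbrella_metrics_py_alt,
    List.foldl_cons, List.foldl_nil, pv_cond_eq]
  cases is_internal <;>
    simp only [Bool.false_eq_true, if_false, if_true, List.append_nil, List.filter_append, List.filter_cons, List.filter_nil] <;>
    split_ifs <;> simp_all

-- ===== VERDICT (by name: the statement is the Claim_ definition above) =====
theorem get_umbrella_metrics_py_spec : Claim_equal_get_umbrella_metrics_py := by
  intro carriers_data is_internal _ _
  unfold Spec_get_umbrella_metrics_py
  exact pv_ports_eq carriers_data is_internal
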